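-- pv_equiv track=rewrite | github.com/Leext/XT-MTL | Bart_Program/program_utils.py | get_program_labels
-- ===== SOURCE A (Python) =====
-- def get_program_labels(functions):
--     cur_labels = []
--     for f in functions:
--         if f in {'Relate'} or f.startswith('Filter'):
--             cur_labels.append('multihop')
--             break
--     for f in functions:
--         if f in {'QFilterStr', 'QFilterNum', 'QFilterYear', 'QFilterDate', 'QueryAttrUnderCondition', 'QueryAttrQualifier', 'QueryRelationQualifier'}:
--             cur_labels.append('qualifier')
--             break
--     for f in functions:
--         if f in {'SelectBetween','SelectAmong'}:
--             cur_labels.append('comparison')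
--             break
--     for f in functions:
--         if f in {'And', 'Or'}:
--             cur_labels.append('logical')
--             break
--     for f in functions:
--         if f in {'Count'}:
--             cur_labels.append('count')
--             break
--     for f in functions:
--         if f in {'VerifyStr','VerifyNum','VerifyYear','VerifyDate'}:
--             cur_labels.append('verify')
--             break
--     return cur_labels
-- ===== SOURCE B (Python) =====
-- _LABEL_OF = {
--     'Relate': 'multihop',
--     'QFilterStr': 'qualifier', 'QFilterNum': 'qualifier', 'QFilterYear': 'qualifier',
--     'QFilterDate': 'qualifier', 'QueryAttrUnderCondition': 'qualifier',
--     'QueryAttrQualifier': 'qualifier', 'QueryRelationQualifier': 'qualifier',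
--     'SelectBetween': 'comparison', 'SelectAmong': 'comparison',
--     'And': 'logical', 'Or': 'logical',
--     'Count': 'count',
--     'VerifyStr': 'verify', 'VerifyNum': 'verify', 'VerifyYear': 'verify', 'VerifyDate': 'verify',
-- }
-- _ORDER = ['multihop', 'qualifier', 'comparison', 'logical', 'count', 'verify']
--
--
-- def get_program_labels(functions):
--     found = set()
--     for f in functions:
--         if f.startswith('Filter'):
--             found.add('multihop')
--         else:
--             lab = _LABEL_OF.get(f)
--             if lab is not None:
--                 found.add(lab)
--     return [lab for lab in _ORDER if lab in found]
-- ===== Notes on version B (the rewrite author's own statement) =====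
-- stated objective: alternative
-- what changed: B inverts the classification: instead of A's six scan-with-break loops (one membership predicate per category), B makes a single pass over the list resolving each name through a name-to-label dictionary (plus the 'Filter' prefix rule) into a set of labels found, then filters the fixed label order by that set.
import Mathlib
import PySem

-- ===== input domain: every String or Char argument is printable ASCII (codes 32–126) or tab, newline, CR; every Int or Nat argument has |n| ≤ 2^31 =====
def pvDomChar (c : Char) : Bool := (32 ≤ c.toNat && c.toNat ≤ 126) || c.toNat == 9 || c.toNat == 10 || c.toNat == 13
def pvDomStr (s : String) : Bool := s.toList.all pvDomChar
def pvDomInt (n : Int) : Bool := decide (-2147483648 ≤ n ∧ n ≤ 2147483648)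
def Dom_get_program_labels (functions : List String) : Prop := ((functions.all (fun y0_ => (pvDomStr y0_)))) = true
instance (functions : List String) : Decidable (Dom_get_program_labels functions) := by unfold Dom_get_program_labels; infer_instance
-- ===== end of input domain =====

set_option maxRecDepth 10000
set_option maxHeartbeats 1000000

-- B replaces A's six scan-with-break loops by one pass through a name→label lookup table
-- collecting the labels found, then filtering the fixed label order (objective: simpler).

-- ===== PORT A =====
-- A's 'for f in functions: if pred(f): append; break' loop: returns whether the break fired
def pvLoopBreak (pred : String → Bool) : List String → Bool
  | [] => false
  | f :: rest => if pred f then true else pvLoopBreak pred rest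

def get_program_labels (functions : List String) : List String :=
  let cur_labels : List String := []
  let cur_labels := if pvLoopBreak (fun f => f == "Relate" || PySem.Str.startswith f "Filter") functions
    then cur_labels ++ ["multihop"] else cur_labels
  let cur_labels := if pvLoopBreak (fun f => ["QFilterStr", "QFilterNum", "QFilterYear", "QFilterDate", "QueryAttrUnderCondition", "QueryAttrQualifier", "QueryRelationQualifier"].contains f) functions
    then cur_labels ++ ["qualifier"] else cur_labels
  let cur_labels := if pvLoopBreak (fun f => ["SelectBetween", "SelectAmong"].contains f) functions
    then cur_labels ++ ["comparison"] else cur_labels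
  let cur_labels := if pvLoopBreak (fun f => ["And", "Or"].contains f) functions
    then cur_labels ++ ["logical"] else cur_labels
  let cur_labels := if pvLoopBreak (fun f => f == "Count") functions
    then cur_labels ++ ["count"] else cur_labels
  let cur_labels := if pvLoopBreak (fun f => ["VerifyStr", "VerifyNum", "VerifyYear", "VerifyDate"].contains f) functions
    then cur_labels ++ ["verify"] else cur_labels
  cur_labels

-- ===== PORT B =====
-- B's name→label table (a Python dict literal)
def pvLabelOf : PySem.Dict String String := PySem.Dict.ofList
  [("Relate", "multihop"),
   ("QFilterStr", "qualifier"), ("QFilterNum", "qualifier"), ("QFilterYear", "qualifier"),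
   ("QFilterDate", "qualifier"), ("QueryAttrUnderCondition", "qualifier"),
   ("QueryAttrQualifier", "qualifier"), ("QueryRelationQualifier", "qualifier"),
   ("SelectBetween", "comparison"), ("SelectAmong", "comparison"),
   ("And", "logical"), ("Or", "logical"),
   ("Count", "count"),
   ("VerifyStr", "verify"), ("VerifyNum", "verify"), ("VerifyYear", "verify"), ("VerifyDate", "verify")]

def pvOrder : List String := ["multihop", "qualifier", "comparison", "logical", "count", "verify"]

-- body of B's single pass: add f's label (if any) to the found-set
def pvStep (s : PySem.Set String) (f : String) : PySem.Set String :=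
  if PySem.Str.startswith f "Filter" then PySem.Set.add s "multihop"
  else match PySem.Dict.get? pvLabelOf f with
    | some lab => PySem.Set.add s lab
    | none => s

def get_program_labels_alt (functions : List String) : List String :=
  let found := functions.foldl pvStep PySem.Set.empty
  pvOrder.filter (fun lab => PySem.Set.contains found lab)

-- ===== PRECONDITION & SPEC =====
def Spec_get_program_labels (functions : List String) (out : List String) : Prop := out = get_program_labels_alt functions
instance (functions : List String) (out : List String) : Decidable (Spec_get_program_labels functions out) := by unfold Spec_get_program_labels; infer_instance

-- ===== CLAIM =====
def Claim_equal_get_program_labels : Prop := ∀ (functions : List String), Dom_get_program_labels functions → Spec_get_program_labels functions (get_program_labels functions)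

-- ===== LEMMAS AND PROOFS =====
theorem pvLoopBreak_eq_any (p : String → Bool) (fs : List String) : pvLoopBreak p fs = fs.any p := by
  induction fs with
  | nil => rfl
  | cons f rest ih =>
    simp only [pvLoopBreak, List.any_cons, ih]
    cases p f <;> simp

-- whether one step of B's pass makes label L present
def pvHit (f L : String) : Bool :=
  (PySem.Str.startswith f "Filter" && (L == "multihop"))
  || (!PySem.Str.startswith f "Filter"
      && ((PySem.Dict.get? pvLabelOf f).map (fun lab => lab == L)).getD false)

theorem pvContains_step (s : PySem.Set String) (f L : String) :
    PySem.Set.contains (pvStep s f) L = (PySem.Set.contains s L || pvHit f L) := by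
  unfold pvStep pvHit
  cases hF : PySem.Str.startswith f "Filter" with
  | true => simp [PySem.Set.mem_add, eq_comm, Bool.or_comm, Bool.beq_eq_decide_eq]
  | false =>
    cases hG : PySem.Dict.get? pvLabelOf f with
    | none => simp
    | some lab => simp [PySem.Set.mem_add, eq_comm, Bool.or_comm, Bool.beq_eq_decide_eq]

theorem pvContains_foldl (fs : List String) (s : PySem.Set String) (L : String) :
    PySem.Set.contains (fs.foldl pvStep s) L
      = (PySem.Set.contains s L || fs.any (fun f => pvHit f L)) := by
  induction fs generalizing s with
  | nil => simp
  | cons f rest ih =>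
    simp only [List.foldl_cons, List.any_cons, ih, pvContains_step, Bool.or_assoc]

theorem pvLabelOf_mk : pvLabelOf = PySem.Dict.mk
  [("Relate", "multihop"),
   ("QFilterStr", "qualifier"), ("QFilterNum", "qualifier"), ("QFilterYear", "qualifier"),
   ("QFilterDate", "qualifier"), ("QueryAttrUnderCondition", "qualifier"),
   ("QueryAttrQualifier", "qualifier"), ("QueryRelationQualifier", "qualifier"),
   ("SelectBetween", "comparison"), ("SelectAmong", "comparison"),
   ("And", "logical"), ("Or", "logical"),
   ("Count", "count"),
   ("VerifyStr", "verify"), ("VerifyNum", "verify"), ("VerifyYear", "verify"), ("VerifyDate", "verify")] := by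
  decide

-- per-label: B's hit condition is exactly A's membership predicate
theorem pvHit_spec (f : String) :
    pvHit f "multihop" = (f == "Relate" || PySem.Str.startswith f "Filter")
    ∧ pvHit f "qualifier" = ["QFilterStr", "QFilterNum", "QFilterYear", "QFilterDate", "QueryAttrUnderCondition", "QueryAttrQualifier", "QueryRelationQualifier"].contains f
    ∧ pvHit f "comparison" = ["SelectBetween", "SelectAmong"].contains f
    ∧ pvHit f "logical" = ["And", "Or"].contains f
    ∧ pvHit f "count" = (f == "Count")
    ∧ pvHit f "verify" = ["VerifyStr", "VerifyNum", "VerifyYear", "VerifyDate"].contains f := by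
  by_cases h1 : ("Relate" : String) = f
  · subst h1; decide
  by_cases h2 : ("QFilterStr" : String) = f
  · subst h2; decide
  by_cases h3 : ("QFilterNum" : String) = f
  · subst h3; decide
  by_cases h4 : ("QFilterYear" : String) = f
  · subst h4; decide
  by_cases h5 : ("QFilterDate" : String) = f
  · subst h5; decide
  by_cases h6 : ("QueryAttrUnderCondition" : String) = f
  · subst h6; decide
  by_cases h7 : ("QueryAttrQualifier" : String) = f
  · subst h7; decide
  by_cases h8 : ("QueryRelationQualifier" : String) = f
  · subst h8; decide
  by_cases h9 : ("SelectBetween" : String) = f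
  · subst h9; decide
  by_cases h10 : ("SelectAmong" : String) = f
  · subst h10; decide
  by_cases h11 : ("And" : String) = f
  · subst h11; decide
  by_cases h12 : ("Or" : String) = f
  · subst h12; decide
  by_cases h13 : ("Count" : String) = f
  · subst h13; decide
  by_cases h14 : ("VerifyStr" : String) = f
  · subst h14; decide
  by_cases h15 : ("VerifyNum" : String) = f
  · subst h15; decide
  by_cases h16 : ("VerifyYear" : String) = f
  · subst h16; decide
  by_cases h17 : ("VerifyDate" : String) = f
  · subst h17; decide
  have hg : PySem.Dict.get? pvLabelOf f = none := by
    rw [pvLabelOf_mk]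
    simp only [PySem.Dict.get?_mk_cons, beq_iff_eq]
    rw [if_neg h1, if_neg h2, if_neg h3, if_neg h4, if_neg h5, if_neg h6, if_neg h7, if_neg h8,
      if_neg h9, if_neg h10, if_neg h11, if_neg h12, if_neg h13, if_neg h14, if_neg h15,
      if_neg h16, if_neg h17]
    rfl
  refine ⟨?_, ?_, ?_, ?_, ?_, ?_⟩ <;>
    simp [pvHit, hg, Ne.symm h1, Ne.symm h2, Ne.symm h3, Ne.symm h4, Ne.symm h5, Ne.symm h6,
      Ne.symm h7, Ne.symm h8, Ne.symm h9, Ne.symm h10, Ne.symm h11, Ne.symm h12, Ne.symm h13,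
      Ne.symm h14, Ne.symm h15, Ne.symm h16, Ne.symm h17]

-- ===== VERDICT =====
theorem get_program_labels_spec : Claim_equal_get_program_labels := by
  intro fs _
  show get_program_labels fs = get_program_labels_alt fs
  simp only [get_program_labels, get_program_labels_alt, pvOrder, List.filter,
    pvContains_foldl, pvLoopBreak_eq_any, PySem.Set.empty]
  have e1 := fun f => (pvHit_spec f).1
  have e2 := fun f => (pvHit_spec f).2.1
  have e3 := fun f => (pvHit_spec f).2.2.1
  have e4 := fun f => (pvHit_spec f).2.2.2.1
  have e5 := fun f => (pvHit_spec f).2.2.2.2.1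
  have e6 := fun f => (pvHit_spec f).2.2.2.2.2
  simp only [e1, e2, e3, e4, e5, e6]
  cases fs.any fun f => f == "Relate" || PySem.Str.startswith f "Filter" <;>
  cases fs.any fun f => ["QFilterStr", "QFilterNum", "QFilterYear", "QFilterDate", "QueryAttrUnderCondition", "QueryAttrQualifier", "QueryRelationQualifier"].contains f <;>
  cases fs.any fun f => ["SelectBetween", "SelectAmong"].contains f <;>
  cases fs.any fun f => ["And", "Or"].contains f <;>
  cases fs.any fun f => f == "Count" <;>
  cases fs.any fun f => ["VerifyStr", "VerifyNum", "VerifyYear", "VerifyDate"].contains f <;>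
  rfl
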